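-- pv_equiv track=rewrite | github.com/trarck/repack | cpp_garbage.py | get_head_class_define_position
-- ===== SOURCE A (Python) =====
-- def get_head_class_define_position(lines):
--     start_line = -1
--     end_line = -1
--     line_index = 0
--
--     find_start = -1
--     find_end = -1
--     current_class_line_count = 0
--
--     # get max class start end
--     for line in lines:
--         if line.startswith("class"):
--             start_line = line_index
--         if line.startswith("};"):
--             end_line = line_index
--             line_count = end_line - start_line
--             if line_count > current_class_line_count:
--                 current_class_line_count = line_count
--                 find_start = start_line
--                 find_end = end_line
--         line_index += 1
--
--     return find_start, find_end
-- ===== SOURCE B (Python) =====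
-- def get_head_class_define_position(lines):
--     # collect candidate blocks, then reduce: pick the first block of maximal positive span
--     blocks = []
--     last_start = -1
--     for i, line in enumerate(lines):
--         if line.startswith("class"):
--             last_start = i
--         if line.startswith("};"):
--             blocks.append((last_start, i))
--     spans = [(e - s, (s, e)) for s, e in blocks if e - s > 0]
--     if not spans:
--         return (-1, -1)
--     m = max(sp for sp, _ in spans)
--     return next(b for sp, b in spans if sp == m)
-- ===== Notes on version B (the rewrite author's own statement) =====
-- stated objective: alternative
-- what changed: B decomposes the single stateful scan into collect-then-reduce: it first builds the list of (class-start, end) blocks, filters those with positive span, then selects the first block of maximal span, instead of A's in-loop running-best update.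
import Mathlib
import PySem

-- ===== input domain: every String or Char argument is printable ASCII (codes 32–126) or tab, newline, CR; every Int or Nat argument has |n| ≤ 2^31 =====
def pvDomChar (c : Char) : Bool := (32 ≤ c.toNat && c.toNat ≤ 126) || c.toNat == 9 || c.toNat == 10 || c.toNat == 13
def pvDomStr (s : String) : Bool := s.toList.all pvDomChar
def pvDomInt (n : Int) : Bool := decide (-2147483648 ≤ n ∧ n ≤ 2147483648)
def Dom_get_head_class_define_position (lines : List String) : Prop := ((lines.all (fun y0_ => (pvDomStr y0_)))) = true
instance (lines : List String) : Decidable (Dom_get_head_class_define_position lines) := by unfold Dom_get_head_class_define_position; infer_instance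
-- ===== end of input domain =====

-- B collects all (class-start, '};'-end) blocks first and then reduces (filter positive span, pick first maximal), instead of A's in-loop running best; same O(n) cost, different decomposition.

-- ===== PORT A =====
-- state: (start_line, end_line, line_index, find_start, find_end, current_class_line_count)
def pvStepA (s : Int × Int × Int × Int × Int × Int) (line : String) : Int × Int × Int × Int × Int × Int :=
  let sl := if PySem.Str.startswith line "class" then s.2.2.1 else s.1
  if PySem.Str.startswith line "};" then
    let el := s.2.2.1
    let lc := el - sl
    if lc > s.2.2.2.2.2 then (sl, el, s.2.2.1 + 1, sl, el, lc)
    else (sl, el, s.2.2.1 + 1, s.2.2.2.1, s.2.2.2.2.1, s.2.2.2.2.2)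
  else (sl, s.2.1, s.2.2.1 + 1, s.2.2.2.1, s.2.2.2.2.1, s.2.2.2.2.2)

def get_head_class_define_position (lines : List String) : Int × Int :=
  let s := lines.foldl pvStepA (-1, -1, 0, -1, -1, 0)
  (s.2.2.2.1, s.2.2.2.2.1)

-- ===== PORT B =====
-- state: (last_start, blocks)
def pvStepB (st : Int × List (Int × Int)) (p : Int × String) : Int × List (Int × Int) :=
  let ls := if PySem.Str.startswith p.2 "class" then p.1 else st.1
  if PySem.Str.startswith p.2 "};" then (ls, st.2 ++ [(ls, p.1)]) else (ls, st.2)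

-- the reduce step of Source B: `max` over the spans, then `next` (first block of maximal span)
def pvSelect : List (Int × (Int × Int)) → Int × Int
  | [] => (-1, -1)
  | q :: rest =>
    match (q :: rest).find? (fun x => x.1 == rest.foldl (fun a x => max a x.1) q.1) with
    | some x => x.2
    | none => (-1, -1)  -- unreachable: the maximum is attained, as in Python's `next`

def get_head_class_define_position_alt (lines : List String) : Int × Int :=
  pvSelect ((((PySem.List.enumerate lines 0).foldl pvStepB (-1, [])).2).filterMap
    (fun q => if q.2 - q.1 > 0 then some (q.2 - q.1, q) else none))

-- ===== PRECONDITION & SPEC =====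
def Spec_get_head_class_define_position (lines : List String) (out : Int × Int) : Prop := out = get_head_class_define_position_alt lines
instance (lines : List String) (out : Int × Int) : Decidable (Spec_get_head_class_define_position lines out) := by unfold Spec_get_head_class_define_position; infer_instance

-- ===== CLAIM (what is proved, stated in full; the proofs are below) =====
def Claim_equal_get_head_class_define_position : Prop := ∀ (lines : List String), Dom_get_head_class_define_position lines → Spec_get_head_class_define_position lines (get_head_class_define_position lines)

-- ===== LEMMAS AND PROOFS =====

-- the blocks the scan produces, written structurally
def blocksRec : List String → Int → Int → List (Int × Int)
  | [], _, _ => []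
  | l :: rest, sl, i =>
    let sl' := if PySem.Str.startswith l "class" then i else sl
    (if PySem.Str.startswith l "};" then [(sl', i)] else []) ++ blocksRec rest sl' (i + 1)

-- A's running-best update, on blocks; state (cc, fs, fe)
def bestStep (s : Int × Int × Int) (b : Int × Int) : Int × Int × Int :=
  if b.2 - b.1 > s.1 then (b.2 - b.1, b.1, b.2) else s

def spansOf (bs : List (Int × Int)) : List (Int × (Int × Int)) :=
  bs.filterMap (fun q => if q.2 - q.1 > 0 then some (q.2 - q.1, q) else none)

def mOf (l : List (Int × (Int × Int))) : Int := l.foldl (fun a x => max a x.1) 0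

def pickOf (l : List (Int × (Int × Int))) : Int × Int :=
  match l.find? (fun x => x.1 == mOf l) with
  | some x => x.2
  | none => (-1, -1)

lemma stepB_blocks : ∀ (lines : List String) (sl i : Int) (acc : List (Int × Int)),
    ((PySem.List.enumerate lines i).foldl pvStepB (sl, acc)).2 = acc ++ blocksRec lines sl i := by
  intro lines
  induction lines with
  | nil => intro sl i acc; simp [PySem.List.enumerate_nil, blocksRec]
  | cons l rest ih =>
    intro sl i acc
    rw [PySem.List.enumerate_cons]
    simp only [List.foldl_cons, blocksRec, pvStepB]
    by_cases h1 : PySem.Chars.startswith l.toList ['c', 'l', 'a', 's', 's'] = true <;>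
    by_cases h2 : PySem.Chars.startswith l.toList ['}', ';'] = true <;>
      simp [h1, h2, ih]

lemma stepA_best : ∀ (lines : List String) (sl el i fs fe cc : Int),
    ((lines.foldl pvStepA (sl, el, i, fs, fe, cc)).2.2.2.1,
     (lines.foldl pvStepA (sl, el, i, fs, fe, cc)).2.2.2.2.1)
    = ((blocksRec lines sl i).foldl bestStep (cc, fs, fe)).2 := by
  intro lines
  induction lines with
  | nil => intro sl el i fs fe cc; simp [blocksRec]
  | cons l rest ih =>
    intro sl el i fs fe cc
    simp only [List.foldl_cons, blocksRec, pvStepA]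
    by_cases h1 : PySem.Str.startswith l "class" <;>
    by_cases h2 : PySem.Str.startswith l "};" <;>
      simp only [h1, h2, if_true, if_false, ite_true, ite_false, List.nil_append,
        List.cons_append, List.foldl_cons, bestStep] <;>
      split_ifs <;> simp_all [ih]

lemma le_foldl_max : ∀ (l : List (Int × (Int × Int))) (a : Int), a ≤ l.foldl (fun a x => max a x.1) a := by
  intro l
  induction l with
  | nil => intro a; simp
  | cons x xs ih =>
    intro a
    simp only [List.foldl_cons]
    exact le_trans (le_max_left a x.1) (ih (max a x.1))

lemma mem_le_foldl_max : ∀ (l : List (Int × (Int × Int))) (a : Int) (x : Int × (Int × Int)),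
    x ∈ l → x.1 ≤ l.foldl (fun a x => max a x.1) a := by
  intro l
  induction l with
  | nil => intro a x h; simp at h
  | cons y ys ih =>
    intro a x h
    simp only [List.foldl_cons]
    rcases List.mem_cons.1 h with h | h
    · subst h; exact le_trans (le_max_right a x.1) (le_foldl_max ys (max a x.1))
    · exact ih (max a y.1) x h

lemma foldl_max_attained : ∀ (l : List (Int × (Int × Int))) (a : Int),
    l.foldl (fun a x => max a x.1) a = a ∨ ∃ x ∈ l, x.1 = l.foldl (fun a x => max a x.1) a := by
  intro l
  induction l with
  | nil => intro a; left; simp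
  | cons y ys ih =>
    intro a
    simp only [List.foldl_cons]
    rcases ih (max a y.1) with h | ⟨x, hx, hx1⟩
    · rw [h]
      rcases max_cases a y.1 with ⟨h1, _⟩ | ⟨h1, _⟩
      · left; exact h1
      · right; exact ⟨y, List.mem_cons_self, h1.symm⟩
    · right; exact ⟨x, List.mem_cons_of_mem _ hx, hx1⟩

lemma mem_spansOf_pos : ∀ (bs : List (Int × Int)) (x : Int × (Int × Int)), x ∈ spansOf bs → 0 < x.1 := by
  intro bs x hx
  simp only [spansOf, List.mem_filterMap] at hx
  obtain ⟨q, _, hq⟩ := hx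
  split at hq
  · rename_i hc
    injection hq with hq'
    subst hq'
    simpa using hc
  · exact absurd hq (by simp)

lemma mOf_append_single (l : List (Int × (Int × Int))) (x : Int × (Int × Int)) :
    mOf (l ++ [x]) = max (mOf l) x.1 := by
  simp [mOf, List.foldl_append]

lemma best_eq_pick : ∀ (bs : List (Int × Int)),
    bs.foldl bestStep (0, -1, -1) = (mOf (spansOf bs), pickOf (spansOf bs)) := by
  intro bs
  induction bs using List.reverseRecOn with
  | nil => simp [spansOf, mOf, pickOf]
  | append_singleton bs b ih =>
    have hsp : spansOf (bs ++ [b]) = spansOf bs ++ spansOf [b] := by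
      simp [spansOf, List.filterMap_append]
    rw [List.foldl_append, List.foldl_cons, List.foldl_nil, ih]
    have hm0 : 0 ≤ mOf (spansOf bs) := le_foldl_max _ 0
    by_cases hb : b.2 - b.1 > 0
    · have hsb : spansOf [b] = [(b.2 - b.1, b)] := by
        simp [spansOf, show b.1 < b.2 by omega]
      rw [hsp, hsb, mOf_append_single]
      by_cases h2 : b.2 - b.1 > mOf (spansOf bs)
      · have hstep : bestStep (mOf (spansOf bs), pickOf (spansOf bs)) b = (b.2 - b.1, b.1, b.2) := by
          simp [bestStep, h2]
        rw [hstep]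
        have hmax : max (mOf (spansOf bs)) (b.2 - b.1) = b.2 - b.1 := max_eq_right (le_of_lt h2)
        rw [hmax]
        have hnone : (spansOf bs).find? (fun x => x.1 == b.2 - b.1) = none := by
          apply List.find?_eq_none.2
          intro x hx
          have hle : x.1 ≤ mOf (spansOf bs) := mem_le_foldl_max (spansOf bs) 0 x hx
          simp only [beq_iff_eq]
          omega
        simp [pickOf, mOf_append_single, hmax, List.find?_append, hnone]
      · have hstep : bestStep (mOf (spansOf bs), pickOf (spansOf bs)) b = (mOf (spansOf bs), pickOf (spansOf bs)) := by
          simp only [bestStep]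
          rw [if_neg h2]
        rw [hstep]
        have hmax : max (mOf (spansOf bs)) (b.2 - b.1) = mOf (spansOf bs) := max_eq_left (by omega)
        rw [hmax]
        have hpos : 0 < mOf (spansOf bs) := by omega
        have hatt : ∃ x ∈ spansOf bs, x.1 = mOf (spansOf bs) := by
          rcases foldl_max_attained (spansOf bs) 0 with h | h
          · exfalso; unfold mOf at hpos; omega
          · exact h
        obtain ⟨x, hx, hx1⟩ := hatt
        have hsome : ((spansOf bs).find? (fun y => y.1 == mOf (spansOf bs))).isSome := by
          apply List.find?_isSome.2
          exact ⟨x, hx, by simp [hx1]⟩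
        cases hf : (spansOf bs).find? (fun y => y.1 == mOf (spansOf bs)) with
        | none => rw [hf] at hsome; simp at hsome
        | some y =>
          simp [pickOf, mOf_append_single, hmax, List.find?_append, hf]
    · have hsb : spansOf [b] = [] := by
        simp [spansOf, show ¬ b.1 < b.2 by omega]
      rw [hsp, hsb, List.append_nil]
      have hc : ¬ b.2 - b.1 > mOf (spansOf bs) := by omega
      have : bestStep (mOf (spansOf bs), pickOf (spansOf bs)) b = (mOf (spansOf bs), pickOf (spansOf bs)) := by
        simp only [bestStep]
        rw [if_neg hc]
      rw [this]

lemma alt_eq_pick (lines : List String) :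
    get_head_class_define_position_alt lines = pickOf (spansOf (blocksRec lines (-1) 0)) := by
  unfold get_head_class_define_position_alt
  rw [stepB_blocks lines (-1) 0 [], List.nil_append]
  show pvSelect (spansOf (blocksRec lines (-1) 0)) = pickOf (spansOf (blocksRec lines (-1) 0))
  cases hs : spansOf (blocksRec lines (-1) 0) with
  | nil => simp [pvSelect, pickOf]
  | cons q rest =>
    have hq : 0 < q.1 := mem_spansOf_pos _ q (by rw [hs]; exact List.mem_cons_self ..)
    have hm : rest.foldl (fun a x => max a x.1) q.1 = mOf (q :: rest) := by
      unfold mOf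
      simp only [List.foldl_cons]
      rw [max_eq_right (le_of_lt hq)]
    simp only [pvSelect, pickOf, hm]

-- ===== VERDICT (by name: the statement is the Claim_ definition above) =====
theorem get_head_class_define_position_spec : Claim_equal_get_head_class_define_position := by
  intro lines _
  unfold Spec_get_head_class_define_position
  rw [alt_eq_pick]
  have hA := stepA_best lines (-1) (-1) 0 (-1) (-1) 0
  rw [best_eq_pick] at hA
  exact hA
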